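-- pv_equiv track=rewrite | github.com/ymseo741/mdtohwpx | md2hwpx/frontmatter_parser.py | _text_to_inlines
-- ===== SOURCE A (Python) =====
-- def _text_to_inlines(text: str) -> list:
--     """
--     Convert a text string to Pandoc inline elements (Str and Space).
--
--     Args:
--         text: Plain text string
--
--     Returns:
--         List of Pandoc inline elements
--     """
--     if not text:
--         return []
--
--     result = []
--     words = text.split(' ')
--
--     for i, word in enumerate(words):
--         if word:
--             result.append({"t": "Str", "c": word})
--         if i < len(words) - 1:
--             result.append({"t": "Space"})
--
--     return result
-- ===== SOURCE B (Python) =====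
-- def _text_to_inlines(text: str) -> list:
--     result = []
--     buf = []
--     for ch in text:
--         if ch == ' ':
--             if buf:
--                 result.append({"t": "Str", "c": ''.join(buf)})
--                 buf = []
--             result.append({"t": "Space"})
--         else:
--             buf.append(ch)
--     if buf:
--         result.append({"t": "Str", "c": ''.join(buf)})
--     return result
-- ===== Notes on version B (the rewrite author's own statement) =====
-- stated objective: alternative
-- what changed: Replaces the split-on-space plus enumerate loop with index bookkeeping by a single character-level scan that keeps a word buffer and emits Str/Space elements as it goes.
import Mathlib
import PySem

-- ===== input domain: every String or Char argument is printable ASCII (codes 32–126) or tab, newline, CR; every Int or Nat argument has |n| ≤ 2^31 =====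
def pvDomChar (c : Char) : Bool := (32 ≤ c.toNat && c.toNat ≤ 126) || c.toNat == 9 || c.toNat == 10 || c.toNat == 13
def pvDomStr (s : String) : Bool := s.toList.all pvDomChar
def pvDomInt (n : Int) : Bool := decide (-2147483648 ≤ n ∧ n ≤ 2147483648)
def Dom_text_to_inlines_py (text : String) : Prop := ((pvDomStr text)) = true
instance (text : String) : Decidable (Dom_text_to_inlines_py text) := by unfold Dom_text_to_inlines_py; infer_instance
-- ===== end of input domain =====

-- B replaces split(' ')+enumerate with a single character scan holding a word buffer; same cost, different decomposition.

-- ===== PORT A =====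
def text_to_inlines_py (text : String) : List (List (String × String)) :=
  if text.toList = [] then []                              -- "if not text: return []"
  else
    let words := PySem.Chars.splitOn text.toList [' ']     -- text.split(' '): sep is nonempty, exact
    (PySem.List.enumerate words).foldl
      (fun result p =>
        let result := if p.2 ≠ [] then result ++ [[("t", "Str"), ("c", String.ofList p.2)]] else result
        if p.1 < (words.length : Int) - 1 then result ++ [[("t", "Space")]] else result)
      []

-- ===== PORT B =====
def text_to_inlines_py_alt (text : String) : List (List (String × String)) :=
  let st := text.toList.foldl
    (fun (st : List (List (String × String)) × List Char) ch =>
      if ch = ' ' then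
        let res := if st.2 ≠ [] then st.1 ++ [[("t", "Str"), ("c", String.ofList st.2)]] else st.1
        (res ++ [[("t", "Space")]], [])
      else (st.1, st.2 ++ [ch]))
    ([], [])
  if st.2 ≠ [] then st.1 ++ [[("t", "Str"), ("c", String.ofList st.2)]] else st.1

-- ===== PRECONDITION & SPEC =====
def Spec_text_to_inlines_py (text : String) (out : List (List (String × String))) : Prop := out = text_to_inlines_py_alt text
instance (text : String) (out : List (List (String × String))) : Decidable (Spec_text_to_inlines_py text out) := by unfold Spec_text_to_inlines_py; infer_instance

-- ===== CLAIM (what is proved, stated in full; the proofs are below) =====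
def Claim_equal_text_to_inlines_py : Prop := ∀ (text : String), Dom_text_to_inlines_py text → Spec_text_to_inlines_py text (text_to_inlines_py text)

-- ===== LEMMAS AND PROOFS =====

-- optional Str element for a (possibly empty) word
def pvStrOpt (w : List Char) : List (List (String × String)) :=
  if w ≠ [] then [[("t", "Str"), ("c", String.ofList w)]] else []

-- prepend a prefix onto the first piece
def pvConsHead (p : List Char) : List (List Char) → List (List Char)
  | [] => [p]
  | w :: ws => (p ++ w) :: ws

-- clean recursion computing l.split(' ')
def pvSplit : List Char → List (List Char)
  | [] => [[]]
  | c :: l => if c = ' ' then [] :: pvSplit l else pvConsHead [c] (pvSplit l)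

-- A's rendering of a word list: Str for nonempty words, Space between consecutive pieces
def pvRendA : List (List Char) → List (List (String × String))
  | [] => []
  | w :: ws =>
    match ws with
    | [] => pvStrOpt w
    | _ :: _ => pvStrOpt w ++ [("t", "Space")] :: pvRendA ws

-- B's scan as a clean recursion
def pvScan (buf : List Char) : List Char → List (List (String × String))
  | [] => pvStrOpt buf
  | c :: l => if c = ' ' then pvStrOpt buf ++ [("t", "Space")] :: pvScan [] l else pvScan (buf ++ [c]) l

theorem pvSplit_ne_nil (l : List Char) : pvSplit l ≠ [] := by
  cases l with
  | nil => simp [pvSplit]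
  | cons c l =>
    simp only [pvSplit]
    split
    · simp
    · cases h : pvSplit l <;> simp [pvConsHead]

theorem pvConsHead_nil (m : List (List Char)) (h : m ≠ []) : pvConsHead [] m = m := by
  cases m with
  | nil => exact absurd rfl h
  | cons w ws => simp [pvConsHead]

theorem pvConsHead_consHead (p q : List Char) (m : List (List Char)) :
    pvConsHead p (pvConsHead q m) = pvConsHead (p ++ q) m := by
  cases m <;> simp [pvConsHead]

theorem pvSplitOn_go_eq (fuel : ℕ) :
    ∀ (l : List Char) (cur : List Char) (acc : List (List Char)), l.length ≤ fuel →
      PySem.Chars.splitOn.go [' '] fuel l cur acc = acc.reverse ++ pvConsHead cur.reverse (pvSplit l) := by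
  induction fuel with
  | zero =>
    intro l cur acc h
    have hl : l = [] := List.eq_nil_of_length_eq_zero (Nat.le_zero.mp h)
    subst hl
    simp [PySem.Chars.splitOn.go, pvSplit, pvConsHead]
  | succ f ih =>
    intro l cur acc h
    cases l with
    | nil => simp [PySem.Chars.splitOn.go, pvSplit, pvConsHead]
    | cons c rest =>
      simp only [PySem.Chars.splitOn.go]
      by_cases hc : c = ' '
      · subst hc
        have hpre : List.isPrefixOf [' '] (' ' :: rest) = true := by simp [List.isPrefixOf]
        rw [if_pos hpre]
        simp only [List.length_singleton, List.drop_succ_cons, List.drop_zero]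
        simp only [List.length_cons] at h
        rw [ih rest [] (cur.reverse :: acc) (Nat.lt_succ_iff.mp (Nat.lt_of_lt_of_le (Nat.lt_succ_self _) h))]
        simp only [pvSplit, if_pos, pvConsHead, List.reverse_cons, List.append_assoc,
          List.singleton_append]
        cases hps : pvSplit rest with
        | nil => exact absurd hps (pvSplit_ne_nil rest)
        | cons w ws => simp
      · have hpre : List.isPrefixOf [' '] (c :: rest) = false := by
          simp [List.isPrefixOf, Ne.symm hc]
        rw [if_neg (by simp [hpre])]
        simp only [List.length_cons] at h
        rw [ih rest (c :: cur) acc (Nat.succ_le_succ_iff.mp h)]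
        simp only [pvSplit, if_neg hc, pvConsHead_consHead]
        simp

theorem pvSplitOn_eq (l : List Char) :
    PySem.Chars.splitOn l [' '] = pvSplit l := by
  unfold PySem.Chars.splitOn
  rw [pvSplitOn_go_eq (l.length + 1) l [] [] (Nat.le_succ _)]
  simp [pvConsHead_nil _ (pvSplit_ne_nil l)]

-- A's loop over enumerate equals pvRendA
theorem pvALoop (n : ℕ) :
    ∀ (ws : List (List Char)) (s : Int) (res : List (List (String × String))),
      s + ws.length = (n : Int) →
      (PySem.List.enumerate ws s).foldl
        (fun result p =>
          if p.1 < (n : Int) - 1 then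
            (if p.2 ≠ [] then result ++ [[("t", "Str"), ("c", String.ofList p.2)]] else result) ++ [[("t", "Space")]]
          else if p.2 ≠ [] then result ++ [[("t", "Str"), ("c", String.ofList p.2)]] else result)
        res = res ++ pvRendA ws := by
  intro ws
  induction ws with
  | nil => intro s res _; simp [PySem.List.enumerate_nil, pvRendA]
  | cons w ws ih =>
    intro s res hn
    rw [PySem.List.enumerate_cons, List.foldl_cons]
    cases ws with
    | nil =>
      have hs : s = (n : Int) - 1 := by simp at hn; omega
      simp only [PySem.List.enumerate_nil, List.foldl_nil, pvRendA]
      rw [if_neg (show ¬ s < (n : Int) - 1 by omega)]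
      by_cases hw : w = [] <;> simp [pvStrOpt, hw]
    | cons w' ws' =>
      have hs : s < (n : Int) - 1 := by simp at hn; omega
      have hn' : s + 1 + (w' :: ws').length = (n : Int) := by simp at hn ⊢; omega
      rw [ih (s + 1) _ hn']
      rw [if_pos hs]
      simp only [pvRendA]
      by_cases hw : w = [] <;> simp [pvStrOpt, hw]

-- B's fold equals pvScan
theorem pvBLoop :
    ∀ (l : List Char) (res : List (List (String × String))) (buf : List Char),
      (let st := l.foldl
        (fun (st : List (List (String × String)) × List Char) ch =>
          if ch = ' ' then
            let r := if st.2 ≠ [] then st.1 ++ [[("t", "Str"), ("c", String.ofList st.2)]] else st.1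
            (r ++ [[("t", "Space")]], [])
          else (st.1, st.2 ++ [ch]))
        (res, buf)
       if st.2 ≠ [] then st.1 ++ [[("t", "Str"), ("c", String.ofList st.2)]] else st.1)
      = res ++ pvScan buf l := by
  intro l
  induction l with
  | nil =>
    intro res buf
    by_cases hb : buf = [] <;> simp [pvScan, pvStrOpt, hb]
  | cons c l ih =>
    intro res buf
    simp only [List.foldl_cons]
    by_cases hc : c = ' '
    · subst hc
      rw [if_pos rfl]
      rw [ih]
      by_cases hb : buf = [] <;> simp [pvScan, pvStrOpt, hb]
    · rw [if_neg hc]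
      rw [ih]
      simp [pvScan, hc]

-- B's scan renders pvConsHead buf of the split
theorem pvScan_eq (l : List Char) : ∀ buf, pvScan buf l = pvRendA (pvConsHead buf (pvSplit l)) := by
  induction l with
  | nil => intro buf; simp [pvScan, pvSplit, pvConsHead, pvRendA]
  | cons c l ih =>
    intro buf
    by_cases hc : c = ' '
    · subst hc
      simp only [pvScan, pvSplit, pvConsHead, if_pos]
      rw [ih []]
      rw [pvConsHead_nil _ (pvSplit_ne_nil l)]
      cases h : pvSplit l with
      | nil => exact absurd h (pvSplit_ne_nil l)
      | cons w ws => simp [pvRendA]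
    · simp only [pvScan, if_neg hc, pvSplit, pvConsHead_consHead]
      rw [ih (buf ++ [c])]

-- ===== VERDICT (by name: the statement is the Claim_ definition above) =====
theorem text_to_inlines_py_spec : Claim_equal_text_to_inlines_py := by
  intro text _
  unfold Spec_text_to_inlines_py text_to_inlines_py text_to_inlines_py_alt
  by_cases h : text.toList = []
  · rw [if_pos h, h]
    simp
  · rw [if_neg h]
    simp only
    rw [pvBLoop text.toList [] []]
    rw [pvScan_eq, pvConsHead_nil _ (pvSplit_ne_nil _), pvSplitOn_eq]
    rw [pvALoop (pvSplit text.toList).length _ 0 [] (by simp)]
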